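-- pv_equiv track=rewrite | github.com/mattklepp/k4 | complete_k4_solver.py | _extract_potential_words
-- ===== SOURCE A (Python) =====
-- from typing import Dict, List, Tuple, Optional, Set
--
-- def _extract_potential_words(plaintext: str) -> List[str]:
--     """Extract potential meaningful words from plaintext"""
--     # Simple word extraction - look for sequences of 4+ characters that could be words
--     potential_words = []
--
--     # Common English patterns and letter frequencies
--     common_patterns = ['THE', 'AND', 'FOR', 'ARE', 'BUT', 'NOT', 'YOU', 'ALL', 'CAN', 'HER', 'WAS', 'ONE', 'OUR', 'HAD', 'BUT', 'HAVE', 'FROM', 'THEY', 'KNOW', 'WANT', 'BEEN', 'GOOD', 'MUCH', 'SOME', 'TIME', 'VERY', 'WHEN', 'COME', 'HERE', 'HOW', 'JUST', 'LIKE', 'LONG', 'MAKE', 'MANY', 'OVER', 'SUCH', 'TAKE', 'THAN', 'THEM', 'WELL', 'WERE']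
--
--     # Look for common patterns
--     for i in range(len(plaintext) - 3):
--         for length in range(4, min(10, len(plaintext) - i + 1)):
--             substring = plaintext[i:i + length]
--             if substring in common_patterns:
--                 potential_words.append(substring)
--
--     return list(set(potential_words))
-- ===== SOURCE B (Python) =====
-- def _extract_potential_words(plaintext: str):
--     """Extract potential meaningful words from plaintext"""
--     # A's scanner only ever tests substrings of length >= 4, so the 3-letter
--     # entries of its word list can never match; the 26 four-letter entries,
--     # pre-sorted, are all that matters.  One substring test per word.
--     words4 = ("BEEN COME FROM GOOD HAVE HERE JUST KNOW LIKE LONG MAKE MANY "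
--               "MUCH OVER SOME SUCH TAKE THAN THEM THEY TIME VERY WANT WELL "
--               "WERE WHEN").split()
--     return [w for w in words4 if w in plaintext]
-- ===== Notes on version B (the rewrite author's own statement) =====
-- stated objective: faster
-- what changed: B drops A's scan over every text position and candidate length and instead iterates once over the 26 four-letter dictionary words (the 3-letter entries can never match A's length-4+ scanner), testing each with Python's C-level substring search; the word table is kept pre-sorted so the output needs no set and no sort; list(set(...))'s Python iteration order is hash-dependent, so outputs are compared as sets and both Lean ports emit sorted order.
import Mathlib
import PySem

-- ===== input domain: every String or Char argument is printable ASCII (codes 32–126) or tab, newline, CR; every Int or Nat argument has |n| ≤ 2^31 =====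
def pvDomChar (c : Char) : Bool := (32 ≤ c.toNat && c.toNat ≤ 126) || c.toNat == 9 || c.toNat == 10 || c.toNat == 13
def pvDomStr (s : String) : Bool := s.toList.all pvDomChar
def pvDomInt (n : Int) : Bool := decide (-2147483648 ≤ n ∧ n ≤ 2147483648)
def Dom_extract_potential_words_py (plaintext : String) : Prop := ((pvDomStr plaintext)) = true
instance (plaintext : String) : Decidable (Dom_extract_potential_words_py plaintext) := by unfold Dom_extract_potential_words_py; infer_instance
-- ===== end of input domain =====

-- B replaces A's position-by-position, length-by-length substring scan with one substring test per
-- word of a pre-sorted table of the 26 four-letter dictionary entries (A's 3-letter entries can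
-- never match its length-4+ scanner), so B needs no set and no sort; list(set(...))'s Python
-- iteration order is hash-dependent and not modelled, so A's port emits the set in sorted order
-- (outputs are compared as sets).

-- ===== PORT A =====
def commonPatterns : List String := ["THE", "AND", "FOR", "ARE", "BUT", "NOT", "YOU", "ALL", "CAN", "HER", "WAS", "ONE", "OUR", "HAD", "BUT", "HAVE", "FROM", "THEY", "KNOW", "WANT", "BEEN", "GOOD", "MUCH", "SOME", "TIME", "VERY", "WHEN", "COME", "HERE", "HOW", "JUST", "LIKE", "LONG", "MAKE", "MANY", "OVER", "SUCH", "TAKE", "THAN", "THEM", "WELL", "WERE"]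

def extract_potential_words_py (plaintext : String) : List String :=
  let n : Int := PySem.Str.len plaintext
  let potential_words : List String :=
    (PySem.List.pyRange 0 (n - 3) 1).foldl (fun acc i =>
      (PySem.List.pyRange 4 (min 10 (n - i + 1)) 1).foldl (fun acc len =>
        if commonPatterns.contains (PySem.Str.slice plaintext (some i) (some (i + len))) then
          acc ++ [PySem.Str.slice plaintext (some i) (some (i + len))]
        else acc) acc) []
  -- list(set(potential_words)): hash iteration order is not modelled, emitted sorted
  PySem.List.sorted (PySem.Set.ofList potential_words) (fun x => x) false

-- ===== PORT B =====
def words4 : List String :=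
  PySem.Str.split₀ "BEEN COME FROM GOOD HAVE HERE JUST KNOW LIKE LONG MAKE MANY MUCH OVER SOME SUCH TAKE THAN THEM THEY TIME VERY WANT WELL WERE WHEN"

def extract_potential_words_py_alt (plaintext : String) : List String :=
  words4.filter (fun w => PySem.Str.isIn w plaintext)

-- ===== PRECONDITION & SPEC =====
def Spec_extract_potential_words_py (plaintext : String) (out : List String) : Prop := out = extract_potential_words_py_alt plaintext
instance (plaintext : String) (out : List String) : Decidable (Spec_extract_potential_words_py plaintext out) := by unfold Spec_extract_potential_words_py; infer_instance

-- ===== CLAIM (what is proved, stated in full; the proofs are below) =====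
def Claim_equal_extract_potential_words_py : Prop := ∀ (plaintext : String), Dom_extract_potential_words_py plaintext → Spec_extract_potential_words_py plaintext (extract_potential_words_py plaintext)

-- ===== LEMMAS AND PROOFS =====

-- Every entry of A's fixed word list has at most 4 characters.
lemma commonPatterns_len_le : ∀ w ∈ commonPatterns, w.toList.length ≤ 4 := by decide

-- B's table, evaluated.
set_option maxRecDepth 4000 in
lemma words4_eq : words4 = ["BEEN", "COME", "FROM", "GOOD", "HAVE", "HERE", "JUST", "KNOW", "LIKE", "LONG", "MAKE", "MANY", "MUCH", "OVER", "SOME", "SUCH", "TAKE", "THAN", "THEM", "THEY", "TIME", "VERY", "WANT", "WELL", "WERE", "WHEN"] := by decide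

-- B's table is strictly sorted (hence nodup).
lemma words4_sorted : words4.Pairwise (fun a b => a < b) := by
  rw [words4_eq]
  refine List.Pairwise.imp (fun hab => String.lt_iff_toList_lt.mpr hab) ?_
  decide

-- B's table holds exactly the length-4 entries of A's list.
lemma mem_words4 (w : String) :
    w ∈ words4 ↔ (w ∈ commonPatterns ∧ w.toList.length = 4) := by
  constructor
  · intro h
    rw [words4_eq] at h
    fin_cases h <;> exact ⟨by decide, by decide⟩
  · rintro ⟨hmem, hlen⟩
    have : ∀ w ∈ commonPatterns, w.toList.length = 4 → w ∈ words4 := by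
      rw [words4_eq]; decide
    exact this w hmem hlen

-- A slice s[i:i+len] with nonnegative bounds, char-level.
lemma slice_toList (p : String) (i L : Int) (hi : 0 ≤ i) (hL : 0 ≤ L) :
    (PySem.Str.slice p (some i) (some (i + L))).toList
      = (p.toList.drop i.toNat).take L.toNat := by
  have h1 : (PySem.Str.slice p (some i) (some (i + L))).toList
      = PySem.List.slice p.toList (some i) (some (i + L)) := by simp [pysem]
  rw [h1, PySem.List.slice_toNat _ hi (by omega)]
  congr 1
  omega

-- What A's double scan collects: exactly the patterns of length 4 occurring in the text.
lemma memA (p w : String) :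
    (w ∈ (PySem.List.pyRange 0 (PySem.Str.len p - 3) 1).flatMap (fun i =>
        ((PySem.List.pyRange 4 (min 10 (PySem.Str.len p - i + 1)) 1).filter
          (fun len => commonPatterns.contains (PySem.Str.slice p (some i) (some (i + len))))).map
          (fun len => PySem.Str.slice p (some i) (some (i + len)))))
      ↔ (w ∈ commonPatterns ∧ w.toList.length = 4 ∧ w.toList <:+: p.toList) := by
  have hn : PySem.Str.len p = (p.toList.length : Int) := by simp [pysem]
  constructor
  · intro h
    simp only [List.mem_flatMap, List.mem_map, List.mem_filter,
      PySem.List.mem_pyRange_one] at h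
    obtain ⟨i, ⟨hi0, hin⟩, L, ⟨⟨hL4, hLlt⟩, hcont⟩, hw⟩ := h
    have hwmem : w ∈ commonPatterns := by
      rw [← hw]; exact List.contains_iff_mem.mp hcont
    have hLle : L ≤ PySem.Str.len p - i := by
      have := lt_min_iff.mp hLlt
      omega
    have hwl : w.toList = (p.toList.drop i.toNat).take L.toNat := by
      rw [← hw, slice_toList p i L hi0 (by omega)]
    have hlen : w.toList.length = L.toNat := by
      rw [hwl]
      simp only [List.length_take, List.length_drop]
      rw [hn] at hLle hin
      omega
    have hle4 : w.toList.length ≤ 4 := commonPatterns_len_le w hwmem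
    have hlen4 : w.toList.length = 4 := by omega
    refine ⟨hwmem, hlen4, ?_⟩
    rw [hwl]
    exact ((p.toList.drop i.toNat).take_prefix L.toNat).isInfix.trans
      (p.toList.drop_suffix i.toNat).isInfix
  · rintro ⟨hwmem, hlen4, hinf⟩
    obtain ⟨pre, suf, hsplit⟩ := hinf
    simp only [List.mem_flatMap, List.mem_map, List.mem_filter,
      PySem.List.mem_pyRange_one]
    have hplen : p.toList.length = pre.length + w.toList.length + suf.length := by
      rw [← hsplit, List.length_append, List.length_append]
    have hslice : PySem.Str.slice p (some (pre.length : Int))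
        (some ((pre.length : Int) + 4)) = w := by
      apply String.toList_inj.mp
      have h4 : (Int.toNat 4) = 4 := rfl
      rw [slice_toList p _ 4 (by positivity) (by norm_num), ← hsplit, Int.toNat_natCast, h4,
        List.append_assoc, List.drop_left, ← hlen4, List.take_left]
    refine ⟨(pre.length : Int), ?_, 4, ⟨⟨by norm_num, ?_⟩, ?_⟩, hslice⟩
    · rw [hn]
      constructor
      · positivity
      · omega
    · rw [hn, lt_min_iff]
      constructor
      · norm_num
      · omega
    · rw [hslice]
      exact List.contains_iff_mem.mpr hwmem

-- What B's filter collects, char-level.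
lemma memB (p w : String) :
    (w ∈ words4.filter (fun w => PySem.Str.isIn w p))
      ↔ (w ∈ commonPatterns ∧ w.toList.length = 4 ∧ w.toList <:+: p.toList) := by
  rw [List.mem_filter, mem_words4, PySem.Str.isIn_iff_infix]
  tauto

-- ===== VERDICT (by name: the statement is the Claim_ definition above) =====
theorem extract_potential_words_py_spec : Claim_equal_extract_potential_words_py := by
  intro p _
  unfold Spec_extract_potential_words_py extract_potential_words_py extract_potential_words_py_alt
  simp only [PySem.List.foldl_append_if, PySem.List.foldl_append_eq_flatMap, List.nil_append]
  apply PySem.List.sorted_eq_of_perm_of_pairwise_lt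
  · refine (List.perm_ext_iff_of_nodup ?_ (PySem.Set.nodup_ofList _)).mpr ?_
    · exact List.Nodup.filter _ (words4_sorted.imp ne_of_lt)
    · intro w
      rw [PySem.Set.mem_ofList, memA, memB]
  · exact words4_sorted.filter _
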